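-- pv_equiv track=rewrite | github.com/PreTeXtBook/pretext-cli | scripts/pr_desc.py | heuristic_summary
-- ===== SOURCE A (Python) =====
-- def heuristic_summary(diff_text: str) -> str:
--     lines = diff_text.splitlines()
--     added = sum(1 for ln in lines if ln.startswith("+") and not ln.startswith("+++"))
--     removed = sum(1 for ln in lines if ln.startswith("-") and not ln.startswith("---"))
--     files = [ln[6:] for ln in lines if ln.startswith("+++ b/")]
--     subsystems = sorted({(f.split("/")[0] if "/" in f else "(root)") for f in files})
--     title = (
--         f"Draft: Update {files[0]} (+{added}/-{removed}, {len(files)} files)"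
--         if files
--         else "Draft: Update codebase"
--     )
--
--     bullets = []
--     if added or removed:
--         bullets.append(
--             f"Code changes: **+{added} / -{removed}** across **{len(files)} file(s)**."
--         )
--     if subsystems:
--         bullets.append("Touches: " + ", ".join(subsystems))
--     if any("test" in f.lower() for f in files):
--         bullets.append("Includes test changes.")
--     if any(f.endswith((".md", ".txt")) for f in files):
--         bullets.append("Includes documentation updates.")
--
--     body = (
--         "\n".join(f"- {b}" for b in bullets) if bullets else "- Minor internal changes."
--     )
--     return f"""# {title}
--
-- ## What changed
-- {body}
--
-- ## Why
-- Briefly explain the problem/goal addressed in this PR.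
--
-- ## How to verify
-- - [ ] Run unit tests
-- - [ ] Manual verification steps
--
-- ## Risks & rollbacks
-- - Risk level: Low / Medium / High
-- - Rollback: `git revert <merge-commit>` or feature flag off
-- """
-- ===== SOURCE B (Python) =====
-- def heuristic_summary(diff_text: str) -> str:
--     added = removed = 0
--     files = []
--     subsystems = set()
--     has_test = has_doc = False
--     for ln in diff_text.splitlines():
--         if ln.startswith("+++ b/"):
--             f = ln[6:]
--             files.append(f)
--             subsystems.add(f.split("/")[0] if "/" in f else "(root)")
--             has_test = has_test or "test" in f.lower()
--             has_doc = has_doc or f.endswith(".md") or f.endswith(".txt")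
--         if ln.startswith("+") and not ln.startswith("+++"):
--             added += 1
--         elif ln.startswith("-") and not ln.startswith("---"):
--             removed += 1
--
--     title = (
--         f"Draft: Update {files[0]} (+{added}/-{removed}, {len(files)} files)"
--         if files
--         else "Draft: Update codebase"
--     )
--     candidates = [
--         (added + removed > 0,
--          f"Code changes: **+{added} / -{removed}** across **{len(files)} file(s)**."),
--         (bool(subsystems), "Touches: " + ", ".join(sorted(subsystems))),
--         (has_test, "Includes test changes."),
--         (has_doc, "Includes documentation updates."),
--     ]
--     bullets = [text for keep, text in candidates if keep]
--     body = "\n".join(f"- {b}" for b in bullets) if bullets else "- Minor internal changes."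
--     return f"""# {title}
--
-- ## What changed
-- {body}
--
-- ## Why
-- Briefly explain the problem/goal addressed in this PR.
--
-- ## How to verify
-- - [ ] Run unit tests
-- - [ ] Manual verification steps
--
-- ## Risks & rollbacks
-- - Risk level: Low / Medium / High
-- - Rollback: `git revert <merge-commit>` or feature flag off
-- """
-- ===== Notes on version B (the rewrite author's own statement) =====
-- stated objective: simpler
-- what changed: Replaces A's five independent passes over the diff lines (two counts, a file comprehension, a set comprehension, two any() scans) with a single loop accumulating one state record, and builds the bullet list by filtering a (flag, text) table instead of A's chain of conditional appends.
import Mathlib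
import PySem

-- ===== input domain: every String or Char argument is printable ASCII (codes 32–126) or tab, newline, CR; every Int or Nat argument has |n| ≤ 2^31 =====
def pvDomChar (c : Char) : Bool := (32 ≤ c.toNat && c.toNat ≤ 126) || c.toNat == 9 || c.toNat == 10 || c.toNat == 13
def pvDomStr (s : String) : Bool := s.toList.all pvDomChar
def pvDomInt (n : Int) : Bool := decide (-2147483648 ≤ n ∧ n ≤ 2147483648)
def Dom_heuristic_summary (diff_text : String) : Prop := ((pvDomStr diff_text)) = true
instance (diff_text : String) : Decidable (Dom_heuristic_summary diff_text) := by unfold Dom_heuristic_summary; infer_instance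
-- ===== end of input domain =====

-- B fuses A's five independent passes over the diff lines into one loop that
-- accumulates counts, files, the subsystem set and the two flags (objective: simpler).

-- ===== PORT A =====

-- helper: f.split("/")[0] if "/" in f else "(root)"  (split never returns [], so [0] is headD)
def pvSubsys (f : String) : String :=
  if PySem.Str.isIn "/" f then ((PySem.Str.split? f "/").getD []).headD "" else "(root)"

def pvTemplate (title body : String) : String :=
  "# " ++ title ++ "\n\n## What changed\n" ++ body ++
  "\n\n## Why\nBriefly explain the problem/goal addressed in this PR.\n\n## How to verify\n- [ ] Run unit tests\n- [ ] Manual verification steps\n\n## Risks & rollbacks\n- Risk level: Low / Medium / High\n- Rollback: `git revert <merge-commit>` or feature flag off\n"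

def heuristic_summary (diff_text : String) : String :=
  let lines := PySem.Str.splitlines diff_text
  let added : Nat :=
    (lines.filter (fun ln => PySem.Str.startswith ln "+" && !PySem.Str.startswith ln "+++")).length
  let removed : Nat :=
    (lines.filter (fun ln => PySem.Str.startswith ln "-" && !PySem.Str.startswith ln "---")).length
  let files : List String :=
    (lines.filter (fun ln => PySem.Str.startswith ln "+++ b/")).map
      (fun ln => PySem.Str.slice ln (some 6) none)
  let subsystems : List String :=
    PySem.List.sorted (PySem.Set.ofList (files.map pvSubsys)) (fun x => x) false
  let title : String :=
    match files with
    | f0 :: _ =>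
        "Draft: Update " ++ f0 ++ " (+" ++ PySem.Int.toStr added ++ "/-" ++
          PySem.Int.toStr removed ++ ", " ++ PySem.Int.toStr files.length ++ " files)"
    | [] => "Draft: Update codebase"
  let bullets : List String := []
  let bullets := if added ≠ 0 ∨ removed ≠ 0 then
      bullets ++ ["Code changes: **+" ++ PySem.Int.toStr added ++ " / -" ++
        PySem.Int.toStr removed ++ "** across **" ++ PySem.Int.toStr files.length ++ " file(s)**."]
    else bullets
  let bullets := if subsystems ≠ [] then
      bullets ++ ["Touches: " ++ PySem.Str.join ", " subsystems] else bullets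
  let bullets := if files.any (fun f => PySem.Str.isIn "test" (PySem.Str.lower f)) then
      bullets ++ ["Includes test changes."] else bullets
  let bullets := if files.any (fun f => PySem.Str.endswith f ".md" || PySem.Str.endswith f ".txt") then
      bullets ++ ["Includes documentation updates."] else bullets
  let body := if bullets ≠ [] then PySem.Str.join "\n" (bullets.map (fun b => "- " ++ b))
    else "- Minor internal changes."
  pvTemplate title body

-- ===== PORT B =====

-- B's loop state: (added, removed, files, subsystem set, has_test, has_doc)
structure PvSt where
  added : Nat
  removed : Nat
  files : List String
  subs : PySem.Set String
  hasTest : Bool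
  hasDoc : Bool
deriving Repr, DecidableEq

def pvStep (st : PvSt) (ln : String) : PvSt :=
  let st :=
    if PySem.Str.startswith ln "+++ b/" then
      let f := PySem.Str.slice ln (some 6) none
      { st with files := st.files ++ [f],
                subs := PySem.Set.add st.subs (pvSubsys f),
                hasTest := st.hasTest || PySem.Str.isIn "test" (PySem.Str.lower f),
                hasDoc := st.hasDoc || PySem.Str.endswith f ".md" || PySem.Str.endswith f ".txt" }
    else st
  if PySem.Str.startswith ln "+" && !PySem.Str.startswith ln "+++" then
    { st with added := st.added + 1 }
  else if PySem.Str.startswith ln "-" && !PySem.Str.startswith ln "---" then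
    { st with removed := st.removed + 1 }
  else st

def heuristic_summary_alt (diff_text : String) : String :=
  let st := (PySem.Str.splitlines diff_text).foldl pvStep ⟨0, 0, [], [], false, false⟩
  let title : String :=
    match st.files with
    | f0 :: _ =>
        "Draft: Update " ++ f0 ++ " (+" ++ PySem.Int.toStr st.added ++ "/-" ++
          PySem.Int.toStr st.removed ++ ", " ++ PySem.Int.toStr st.files.length ++ " files)"
    | [] => "Draft: Update codebase"
  let candidates : List (Bool × String) :=
    [ (decide (0 < st.added + st.removed),
       "Code changes: **+" ++ PySem.Int.toStr st.added ++ " / -" ++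
         PySem.Int.toStr st.removed ++ "** across **" ++ PySem.Int.toStr st.files.length ++ " file(s)**."),
      (decide (st.subs ≠ []),
       "Touches: " ++ PySem.Str.join ", " (PySem.List.sorted st.subs (fun x => x) false)),
      (st.hasTest, "Includes test changes."),
      (st.hasDoc, "Includes documentation updates.") ]
  let bullets := (candidates.filter (·.1)).map (·.2)
  let body := if bullets ≠ [] then PySem.Str.join "\n" (bullets.map (fun b => "- " ++ b))
    else "- Minor internal changes."
  pvTemplate title body

-- ===== PRECONDITION & SPEC =====
def Spec_heuristic_summary (diff_text : String) (out : String) : Prop := out = heuristic_summary_alt diff_text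
instance (diff_text : String) (out : String) : Decidable (Spec_heuristic_summary diff_text out) := by unfold Spec_heuristic_summary; infer_instance

-- ===== CLAIM (what is proved, stated in full; the proofs are below) =====
def Claim_equal_heuristic_summary : Prop := ∀ (diff_text : String), Dom_heuristic_summary diff_text → Spec_heuristic_summary diff_text (heuristic_summary diff_text)

-- ===== LEMMAS AND PROOFS =====

theorem pvLoop_char (lines : List String) (st : PvSt) :
    lines.foldl pvStep st =
      ⟨st.added + (lines.filter (fun ln => PySem.Str.startswith ln "+" && !PySem.Str.startswith ln "+++")).length,
       st.removed + (lines.filter (fun ln => PySem.Str.startswith ln "-" && !PySem.Str.startswith ln "---")).length,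
       st.files ++ ((lines.filter (fun ln => PySem.Str.startswith ln "+++ b/")).map
         (fun ln => PySem.Str.slice ln (some 6) none)),
       (((lines.filter (fun ln => PySem.Str.startswith ln "+++ b/")).map
         (fun ln => PySem.Str.slice ln (some 6) none)).map pvSubsys).foldl PySem.Set.add st.subs,
       st.hasTest || ((lines.filter (fun ln => PySem.Str.startswith ln "+++ b/")).map
         (fun ln => PySem.Str.slice ln (some 6) none)).any (fun f => PySem.Str.isIn "test" (PySem.Str.lower f)),
       st.hasDoc || ((lines.filter (fun ln => PySem.Str.startswith ln "+++ b/")).map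
         (fun ln => PySem.Str.slice ln (some 6) none)).any
           (fun f => PySem.Str.endswith f ".md" || PySem.Str.endswith f ".txt")⟩ := by
  induction lines generalizing st with
  | nil => simp
  | cons ln rest ih =>
      have hsw : ∀ (p q : List Char), p <+: q →
          PySem.Chars.startswith ln.toList q = true → PySem.Chars.startswith ln.toList p = true := by
        intro p q hpq h
        rw [PySem.Chars.startswith_iff] at h ⊢
        exact hpq.trans h
      have hpm : PySem.Chars.startswith ln.toList ['+'] = true →
          PySem.Chars.startswith ln.toList ['-'] = true → False := by
        intro a b
        rw [PySem.Chars.startswith_iff] at a b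
        obtain ⟨t1, e1⟩ := a
        obtain ⟨t2, e2⟩ := b
        rw [← e1] at e2
        simp at e2
      simp only [List.foldl_cons, ih]
      unfold pvStep
      by_cases hb : PySem.Chars.startswith ln.toList ['+','+','+',' ','b','/'] = true <;>
        by_cases h1 : PySem.Chars.startswith ln.toList ['+'] = true <;>
        by_cases h3 : PySem.Chars.startswith ln.toList ['+','+','+'] = true <;>
        by_cases g1 : PySem.Chars.startswith ln.toList ['-'] = true <;>
        by_cases g3 : PySem.Chars.startswith ln.toList ['-','-','-'] = true
      all_goals try (exact absurd (hsw _ _ (by decide) hb) h3)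
      all_goals try (exact absurd (hsw _ _ (by decide) h3) h1)
      all_goals try (exact absurd (hsw _ _ (by decide) g3) g1)
      all_goals try (exact (hpm h1 g1).elim)
      all_goals
        simp [hb, h1, h3, g1, g3, PvSt.mk.injEq] <;>
          first | omega | simp [Bool.or_assoc]

theorem heuristic_summary_spec : Claim_equal_heuristic_summary := by
  intro diff_text _
  unfold Spec_heuristic_summary heuristic_summary heuristic_summary_alt
  rw [pvLoop_char]
  simp only [Nat.zero_add, List.nil_append, Bool.false_or, ← PySem.Set.ofList_eq_foldl]
  generalize (List.filter (fun ln => PySem.Str.startswith ln "+" && !PySem.Str.startswith ln "+++")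
      (PySem.Str.splitlines diff_text)).length = a
  generalize (List.filter (fun ln => PySem.Str.startswith ln "-" && !PySem.Str.startswith ln "---")
      (PySem.Str.splitlines diff_text)).length = r
  generalize ((List.filter (fun ln => PySem.Str.startswith ln "+++ b/")
      (PySem.Str.splitlines diff_text)).map (fun ln => PySem.Str.slice ln (some 6) none)) = fs
  generalize (fs.map pvSubsys) = ms
  generalize (fs.any (fun f => PySem.Str.isIn "test" (PySem.Str.lower f))) = t
  generalize (fs.any (fun f => PySem.Str.endswith f ".md" || PySem.Str.endswith f ".txt")) = d
  by_cases c1 : a ≠ 0 ∨ r ≠ 0 <;>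
    by_cases c2 : PySem.Set.ofList ms ≠ ([] : List String) <;>
      cases t <;> cases d <;>
        simp [c1, c2, List.filter, PySem.List.sorted_eq_nil_iff,
          (show (0 < a + r) ↔ (a ≠ 0 ∨ r ≠ 0) by omega)]
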